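-- pv_equiv track=rewrite | github.com/bilaaaal0/Compiler-Construction-Project | CLR_minimal/clr_analyzer.py | parse_production
-- ===== SOURCE A (Python) =====
-- def parse_production(rhs):
--     """Parse a production right-hand side into symbols"""
--     symbols = []
--     i = 0
--     while i < len(rhs):
--         if rhs[i] == "'":
--             j = i + 1
--             while j < len(rhs) and rhs[j] != "'":
--                 j += 1
--             symbols.append(rhs[i:j+1])
--             i = j + 1
--         elif rhs[i].isspace():
--             i += 1
--         else:
--             j = i
--             while j < len(rhs) and not rhs[j].isspace() and rhs[j] != "'":
--                 j += 1
--             symbol = rhs[i:j]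
--             if symbol:
--                 symbols.append(symbol)
--             i = j
--
--     return symbols
-- ===== SOURCE B (Python) =====
-- def parse_production(rhs):
--     """Parse a production right-hand side into symbols (single-pass state machine)."""
--     symbols = []
--     buf = ""
--     in_quote = False
--     for ch in rhs:
--         if in_quote:
--             buf += ch
--             if ch == "'":
--                 symbols.append(buf)
--                 buf = ""
--                 in_quote = False
--         elif ch == "'":
--             if buf:
--                 symbols.append(buf)
--             buf = "'"
--             in_quote = True
--         elif ch.isspace():
--             if buf:
--                 symbols.append(buf)
--             buf = ""
--         else:
--             buf += ch
--     if buf: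
--         symbols.append(buf)
--     return symbols
-- ===== Notes on version B (the rewrite author's own statement) =====
-- stated objective: alternative
-- what changed: Replaced the index-based outer loop with nested inner scanning loops and slicing by a single char-by-char pass maintaining a current-token buffer and an in_quote flag, flushing on whitespace, closing quotes and end of input.
import Mathlib
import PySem

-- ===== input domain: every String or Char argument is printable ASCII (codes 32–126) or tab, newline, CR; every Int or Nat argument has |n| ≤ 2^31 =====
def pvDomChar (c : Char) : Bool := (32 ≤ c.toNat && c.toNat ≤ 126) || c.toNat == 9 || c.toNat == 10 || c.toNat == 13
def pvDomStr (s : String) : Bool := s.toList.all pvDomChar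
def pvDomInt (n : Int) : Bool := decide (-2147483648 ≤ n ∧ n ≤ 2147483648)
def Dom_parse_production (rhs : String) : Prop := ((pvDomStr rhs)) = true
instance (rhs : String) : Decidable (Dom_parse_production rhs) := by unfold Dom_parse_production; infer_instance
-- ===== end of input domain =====

-- B replaces A's index/slice scanning loops with one char-by-char state machine (buffer + in_quote flag); alternative decomposition, same cost.

-- ===== PORT A =====
-- inner while loop `while j < len and rhs[j] != "'"` plus the slice rhs[i:j+1]:
-- collects the scanned characters (closing quote included when found) and returns the rest after it
def aQuoteScan : List Char → (List Char × List Char)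
  | [] => ([], [])
  | c :: cs =>
    if c = '\'' then ([c], cs)
    else
      let (t, r) := aQuoteScan cs
      (c :: t, r)

-- inner while loop `while j < len and not rhs[j].isspace() and rhs[j] != "'"` plus the slice rhs[i:j]
def aBareScan : List Char → (List Char × List Char)
  | [] => ([], [])
  | c :: cs =>
    if ¬ (PySem.Chars.isspace c) ∧ c ≠ '\'' then
      let (t, r) := aBareScan cs
      (c :: t, r)
    else
      ([], c :: cs)

theorem aQuoteScan_len (cs : List Char) : (aQuoteScan cs).2.length ≤ cs.length := by
  induction cs with
  | nil => simp [aQuoteScan]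
  | cons c cs ih => simp only [aQuoteScan]; split <;> (simp; try omega)

theorem aBareScan_len (cs : List Char) : (aBareScan cs).2.length ≤ cs.length := by
  induction cs with
  | nil => simp [aBareScan]
  | cons c cs ih => simp only [aBareScan]; split <;> (simp; try omega)

-- the outer `while i < len(rhs)` loop, over the remaining characters
def aLoop : List Char → List String
  | [] => []
  | c :: cs =>
    if c = '\'' then
      String.ofList ('\'' :: (aQuoteScan cs).1) :: aLoop (aQuoteScan cs).2
    else if PySem.Chars.isspace c then
      aLoop cs
    else
      -- `if symbol:` — the scanned symbol, starting with the non-space non-quote c, is never empty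
      if (c :: (aBareScan cs).1) = [] then aLoop (aBareScan cs).2
      else String.ofList (c :: (aBareScan cs).1) :: aLoop (aBareScan cs).2
termination_by cs => cs.length
decreasing_by
  · have := aQuoteScan_len cs; simp; omega
  · simp
  · have := aBareScan_len cs; simp; omega
  · have := aBareScan_len cs; simp; omega

def parse_production (rhs : String) : List String := aLoop rhs.toList

-- ===== PORT B =====
-- one step of the for-loop of Source B; state = (symbols, buf, in_quote)
def bStep (st : List String × List Char × Bool) (c : Char) : List String × List Char × Bool :=
  match st with
  | (sy, buf, inQ) =>
    if inQ then
      let buf' := buf ++ [c]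
      if c = '\'' then (sy ++ [String.ofList buf'], [], false) else (sy, buf', true)
    else if c = '\'' then
      ((if buf ≠ [] then sy ++ [String.ofList buf] else sy), ['\''], true)
    else if PySem.Chars.isspace c then
      ((if buf ≠ [] then sy ++ [String.ofList buf] else sy), [], false)
    else
      (sy, buf ++ [c], false)

-- the trailing `if buf: symbols.append(buf)`
def bFinish (st : List String × List Char × Bool) : List String :=
  if st.2.1 ≠ [] then st.1 ++ [String.ofList st.2.1] else st.1

def parse_production_alt (rhs : String) : List String :=
  bFinish (rhs.toList.foldl bStep ([], [], false))

-- ===== PRECONDITION & SPEC =====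
def Spec_parse_production (rhs : String) (out : List String) : Prop := out = parse_production_alt rhs
instance (rhs : String) (out : List String) : Decidable (Spec_parse_production rhs out) := by unfold Spec_parse_production; infer_instance

-- ===== CLAIM (what is proved, stated in full; the proofs are below) =====
def Claim_equal_parse_production : Prop := ∀ (rhs : String), Dom_parse_production rhs → Spec_parse_production rhs (parse_production rhs)

-- ===== LEMMAS AND PROOFS =====

-- folding B in quote mode over cs = A's quote scan: token flushed, fold resumes in neutral state
theorem bFold_quote (cs : List Char) : ∀ (sy : List String) (buf : List Char), buf ≠ [] →
    bFinish (cs.foldl bStep (sy, buf, true)) =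
    bFinish ((aQuoteScan cs).2.foldl bStep (sy ++ [String.ofList (buf ++ (aQuoteScan cs).1)], [], false)) := by
  induction cs with
  | nil => intro sy buf h; simp [aQuoteScan, bFinish, h]
  | cons c cs ih =>
    intro sy buf h
    by_cases hq : c = '\''
    · subst hq; simp [aQuoteScan, bStep]
    · rw [show aQuoteScan (c :: cs) = (c :: (aQuoteScan cs).1, (aQuoteScan cs).2) from by
        simp [aQuoteScan, hq]]
      simp only [List.foldl_cons]
      rw [show bStep (sy, buf, true) c = (sy, buf ++ [c], true) from by simp [bStep, hq]]
      have := ih sy (buf ++ [c]) (by simp)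
      simpa using this

-- folding B in neutral mode with a nonempty buffer over cs = A's bare scan: token flushed, fold resumes neutrally
theorem bFold_bare (cs : List Char) : ∀ (sy : List String) (buf : List Char), buf ≠ [] →
    bFinish (cs.foldl bStep (sy, buf, false)) =
    bFinish ((aBareScan cs).2.foldl bStep (sy ++ [String.ofList (buf ++ (aBareScan cs).1)], [], false)) := by
  induction cs with
  | nil => intro sy buf h; simp [aBareScan, bFinish, h]
  | cons c cs ih =>
    intro sy buf h
    by_cases hq : c = '\''
    · subst hq
      simp [aBareScan, bStep, h]
    · by_cases hs : PySem.Chars.isspace c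
      · simp [aBareScan, hs, hq, bStep, h]
      · rw [show aBareScan (c :: cs) = (c :: (aBareScan cs).1, (aBareScan cs).2) from by
          simp [aBareScan, hq, hs]]
        simp only [List.foldl_cons]
        rw [show bStep (sy, buf, false) c = (sy, buf ++ [c], false) from by simp [bStep, hq, hs]]
        have := ih sy (buf ++ [c]) (by simp)
        simpa using this

-- main: B's fold, started neutrally, computes A's loop
theorem main_lemma (n : Nat) : ∀ (cs : List Char), cs.length ≤ n → ∀ (sy : List String),
    bFinish (cs.foldl bStep (sy, [], false)) = sy ++ aLoop cs := by
  induction n with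
  | zero =>
    intro cs hlen sy
    have : cs = [] := List.eq_nil_of_length_eq_zero (Nat.le_zero.mp hlen)
    subst this; simp [aLoop, bFinish]
  | succ n ih =>
    intro cs hlen sy
    match cs with
    | [] => simp [aLoop, bFinish]
    | c :: cs =>
      simp only [List.length_cons, Nat.succ_le_succ_iff] at hlen
      by_cases hq : c = '\''
      · subst hq
        rw [aLoop]
        simp only [List.foldl_cons]
        rw [show bStep (sy, [], false) '\'' = (sy, ['\''], true) from by simp [bStep]]
        rw [bFold_quote cs sy ['\''] (by simp)]
        rw [ih _ (le_trans (aQuoteScan_len cs) hlen)]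
        simp
      · by_cases hs : PySem.Chars.isspace c
        · rw [aLoop]
          simp only [List.foldl_cons, if_neg hq, if_pos hs]
          rw [show bStep (sy, [], false) c = (sy, [], false) from by simp [bStep, hq, hs]]
          exact ih cs hlen sy
        · rw [aLoop]
          simp only [List.foldl_cons, if_neg hq, if_neg hs]
          rw [if_neg (by simp : ¬(c :: (aBareScan cs).1 = []))]
          rw [show bStep (sy, [], false) c = (sy, [c], false) from by simp [bStep, hq, hs]]
          rw [bFold_bare cs sy [c] (by simp)]
          rw [ih _ (le_trans (aBareScan_len cs) hlen)]
          simp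

-- ===== VERDICT (by name: the statement is the Claim_ definition above) =====
theorem parse_production_spec : Claim_equal_parse_production := by
  intro rhs _
  unfold Spec_parse_production parse_production parse_production_alt
  have := main_lemma rhs.toList.length rhs.toList le_rfl []
  simpa using this.symm
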